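-- pv_equiv track=rewrite | github.com/shellphish/artiphishell | pipelines/apis/embedding_api/local_models.py | sample_chunks
-- ===== SOURCE A (Python) =====
-- import math
--
-- def sample_chunks(chunks, max_chunks=6):
--
--     num_chunks = len(chunks)
--
--     if num_chunks <= max_chunks or max_chunks == -1:
--         return chunks
--
--     else:
--
--         mc = 3*math.ceil(max_chunks/3)
--
--         chunk_ids = list(range(num_chunks))
--
--         from_each_section = mc//3
--
--         beg = chunk_ids[:from_each_section]
--         mid = chunk_ids[(num_chunks//2)-(from_each_section//2):(num_chunks//2)+(math.ceil(from_each_section/2))]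
--         end = chunk_ids[-from_each_section:]
--
--         new_chunk_ids = sorted(list(set(beg+mid+end)))
--         return [chunks[ii] for ii in new_chunk_ids]
-- ===== SOURCE B (Python) =====
-- def sample_chunks(chunks, max_chunks=6):
--     n = len(chunks)
--     if n <= max_chunks or max_chunks == -1:
--         return chunks
--     # k = ceil(max_chunks / 3) chunks from each of begin / middle / end
--     k = (max_chunks + 2) // 3
--     lo = n // 2 - k // 2
--     hi = n // 2 + (k + 1) // 2
--     # merge the three index intervals [0,k), [lo,hi), [n-k,n) (starts are ordered)
--     out = []
--     cur_a, cur_b = 0, k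
--     for a, b in ((lo, hi), (n - k, n)):
--         if a <= cur_b:
--             cur_b = max(cur_b, b)
--         else:
--             out.extend(chunks[cur_a:cur_b])
--             cur_a, cur_b = a, b
--     out.extend(chunks[cur_a:cur_b])
--     return out
-- ===== Notes on version B (the rewrite author's own statement) =====
-- stated objective: faster
-- what changed: B computes the three begin/middle/end index intervals arithmetically and merges the (start-ordered) intervals in one 3-step scan, concatenating slices of chunks, instead of materializing range(n), slicing it, deduplicating through a set and sorting.
-- outside the precondition, e.g. on sample_chunks([7, 8, 9], 0): A returns [7, 8, 9], B returns []; on sample_chunks([7, 8, 9], -4): A returns [7, 8, 9], B returns [7, 8]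
import Mathlib
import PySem

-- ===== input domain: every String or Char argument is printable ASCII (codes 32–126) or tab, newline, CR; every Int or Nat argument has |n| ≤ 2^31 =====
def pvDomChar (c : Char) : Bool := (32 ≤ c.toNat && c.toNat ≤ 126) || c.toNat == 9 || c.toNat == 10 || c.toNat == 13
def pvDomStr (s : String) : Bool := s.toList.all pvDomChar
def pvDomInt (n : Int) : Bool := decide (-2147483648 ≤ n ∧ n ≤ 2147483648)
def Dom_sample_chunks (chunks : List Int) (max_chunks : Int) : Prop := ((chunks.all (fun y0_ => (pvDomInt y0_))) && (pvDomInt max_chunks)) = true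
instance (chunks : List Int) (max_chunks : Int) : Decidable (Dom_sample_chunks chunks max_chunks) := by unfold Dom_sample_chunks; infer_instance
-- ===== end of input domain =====

-- B merges the three index intervals (begin/middle/end) arithmetically and concatenates
-- slices of `chunks`, instead of materializing range(n), a set and a sort: O(max_chunks) work
-- after the slice arithmetic vs A's O(n log n).


-- ===== PORT A =====
def sample_chunks (chunks : List Int) (max_chunks : Int) : List Int :=
  let num_chunks : Int := chunks.length
  if num_chunks ≤ max_chunks ∨ max_chunks = -1 then chunks
  else
    -- math.ceil(max_chunks/3) = -((-max_chunks)//3); exact for |max_chunks| ≤ 2^31 (double rounding cannot cross an integer)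
    let mc : Int := 3 * (-(PySem.Int.floordiv (-max_chunks) 3))
    let chunk_ids := PySem.List.pyRange 0 num_chunks 1
    let from_each_section := PySem.Int.floordiv mc 3
    let beg := PySem.List.slice chunk_ids none (some from_each_section)
    let mid := PySem.List.slice chunk_ids
      (some (PySem.Int.floordiv num_chunks 2 - PySem.Int.floordiv from_each_section 2))
      (some (PySem.Int.floordiv num_chunks 2 + (-(PySem.Int.floordiv (-from_each_section) 2))))
    let end_ := PySem.List.slice chunk_ids (some (-from_each_section)) none
    let new_chunk_ids := PySem.List.sorted (PySem.Set.ofList (beg ++ mid ++ end_)) (fun x => x) false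
    -- chunks[ii]: every ii comes from range(num_chunks), so always in range; default is never used
    new_chunk_ids.map (fun ii => PySem.List.pyGetD chunks ii 0)

-- ===== PORT B =====
-- the merge loop of Source B: fold the remaining segments, keeping the current merged interval (cur_a, cur_b)
def mergeSegs (chunks : List Int) (segs : List (Int × Int)) (out : List Int) (cur_a cur_b : Int) : List Int :=
  match segs with
  | [] => out ++ PySem.List.slice chunks (some cur_a) (some cur_b)
  | (a, b) :: rest =>
    if a ≤ cur_b then mergeSegs chunks rest out cur_a (max cur_b b)
    else mergeSegs chunks rest (out ++ PySem.List.slice chunks (some cur_a) (some cur_b)) a b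

def sample_chunks_alt (chunks : List Int) (max_chunks : Int) : List Int :=
  let n : Int := chunks.length
  if n ≤ max_chunks ∨ max_chunks = -1 then chunks
  else
    let k := PySem.Int.floordiv (max_chunks + 2) 3
    let lo := PySem.Int.floordiv n 2 - PySem.Int.floordiv k 2
    let hi := PySem.Int.floordiv n 2 + PySem.Int.floordiv (k + 1) 2
    mergeSegs chunks [(lo, hi), (n - k, n)] [] 0 k

-- ===== PRECONDITION & SPEC =====
-- Pre_ restricts to the natural domain of a "take at most max_chunks samples" parameter:
-- max_chunks ≥ 1 or the sentinel -1 (plus the inputs where agreement is trivial anyway: empty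
-- chunks, and max_chunks ≤ -3·len, where all slices on both sides are empty).
-- For other nonpositive max_chunks A still returns, but only
-- by accident of slicing (chunk_ids[-k:] with k ≤ 0 yields all or almost all indices, so A
-- returns everything instead of at most max_chunks elements); B does the natural thing there.
def Pre_sample_chunks (chunks : List Int) (max_chunks : Int) : Prop :=
  chunks = [] ∨ max_chunks = -1 ∨ 1 ≤ max_chunks ∨ max_chunks ≤ -3 * (chunks.length : Int)
instance (chunks : List Int) (max_chunks : Int) : Decidable (Pre_sample_chunks chunks max_chunks) := by
  unfold Pre_sample_chunks; infer_instance

def pvWitness_sample_chunks : List Int × Int := ([10, 20, 30, 40, 50, 60, 70, 80, 90, 100], 4)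

def Spec_sample_chunks (chunks : List Int) (max_chunks : Int) (out : List Int) : Prop := out = sample_chunks_alt chunks max_chunks
instance (chunks : List Int) (max_chunks : Int) (out : List Int) : Decidable (Spec_sample_chunks chunks max_chunks out) := by unfold Spec_sample_chunks; infer_instance

-- ===== CLAIM (what is proved, stated in full; the proofs are below) =====
def Claim_equal_sample_chunks : Prop := ∀ (chunks : List Int) (max_chunks : Int), Dom_sample_chunks chunks max_chunks → Pre_sample_chunks chunks max_chunks → Spec_sample_chunks chunks max_chunks (sample_chunks chunks max_chunks)

-- ===== LEMMAS AND PROOFS =====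

-- take/drop of range(n) are ranges
lemma take_pyRange (n : Int) (m : Nat) (h : (m : Int) ≤ n) :
    (PySem.List.pyRange 0 n 1).take m = PySem.List.pyRange 0 (m : Int) 1 := by
  rw [PySem.List.pyRange_one_append 0 (m : Int) n (by positivity) h]
  exact List.take_left' (by rw [PySem.List.length_pyRange_one]; omega)

lemma drop_pyRange (n : Int) (m : Nat) (h : (m : Int) ≤ n) :
    (PySem.List.pyRange 0 n 1).drop m = PySem.List.pyRange (m : Int) n 1 := by
  rw [PySem.List.pyRange_one_append 0 (m : Int) n (by positivity) h]
  exact List.drop_left' (by rw [PySem.List.length_pyRange_one]; omega)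

-- chunk_ids[a:b] = range(a, b) for 0 ≤ a ≤ b ≤ n
lemma slice_pyRange (n a b : Int) (h0 : 0 ≤ a) (hab : a ≤ b) (hbn : b ≤ n) :
    PySem.List.slice (PySem.List.pyRange 0 n 1) (some a) (some b) = PySem.List.pyRange a b 1 := by
  rw [PySem.List.slice_toNat _ h0 (le_trans h0 hab),
      drop_pyRange n a.toNat (by omega), Int.toNat_of_nonneg h0,
      PySem.List.pyRange_one_append a b n hab hbn]
  exact List.take_left' (by rw [PySem.List.length_pyRange_one]; omega)

-- [xs[i] for i in range(a, b)] = xs[a:b] for 0 ≤ a ≤ b ≤ len(xs)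
lemma map_get_pyRange (xs : List Int) (a b : Int) (h0 : 0 ≤ a) (hab : a ≤ b)
    (hb : b ≤ (xs.length : Int)) :
    (PySem.List.pyRange a b 1).map (fun i => PySem.List.pyGetD xs i 0) =
      PySem.List.slice xs (some a) (some b) := by
  have hdropa := PySem.List.map_pyGetD_pyRange' xs 0 h0
  have hdropb := PySem.List.map_pyGetD_pyRange' xs 0 (le_trans h0 hab)
  rw [PySem.List.pyRange_one_append a b (xs.length : Int) hab hb, List.map_append,
      hdropb] at hdropa
  rw [PySem.List.slice_toNat _ h0 (le_trans h0 hab), ← hdropa]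
  exact (List.take_left' (by rw [List.length_map, PySem.List.length_pyRange_one]; omega)).symm

-- sorted(set(U)) is the unique strictly increasing list with U's elements
lemma sorted_set_eq (U M : List Int) (hmem : ∀ x, x ∈ M ↔ x ∈ U) (hp : M.Pairwise (· < ·)) :
    PySem.List.sorted (PySem.Set.ofList U) (fun x => x) false = M := by
  refine PySem.List.sorted_eq_of_perm_of_pairwise_lt _ _ _ ?_ hp
  refine (List.perm_ext_iff_of_nodup (hp.imp fun h => ne_of_lt h) (PySem.Set.nodup_ofList U)).mpr ?_
  intro x
  rw [PySem.Set.mem_ofList, hmem]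

lemma pairwise_lt_pyRange_append (a b c d : Int) (h : ∀ x y : Int, a ≤ x → x < b → c ≤ y → y < d → x < y) :
    (PySem.List.pyRange a b 1 ++ PySem.List.pyRange c d 1).Pairwise (· < ·) := by
  rw [List.pairwise_append]
  refine ⟨PySem.List.pairwise_lt_pyRange_one a b, PySem.List.pairwise_lt_pyRange_one c d, ?_⟩
  intro x hx y hy
  rw [PySem.List.mem_pyRange_one] at hx hy
  exact h x y hx.1 hx.2 hy.1 hy.2

-- a slice whose start is at or past the end is empty
lemma slice_nil_of_start_ge (xs : List Int) (a b : Int) (ha : (xs.length : Int) ≤ a) :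
    PySem.List.slice xs (some a) (some b) = [] := by
  apply List.eq_nil_iff_length_eq_zero.mpr
  rw [PySem.List.length_slice]
  have h1 : PySem.List.clampIdx xs.length a = xs.length := by
    rw [(by omega : a = ((a.toNat : Nat) : Int)), PySem.List.clampIdx_natCast]
    omega
  have h2 : PySem.List.clampIdx xs.length b ≤ xs.length := PySem.List.clampIdx_le xs.length b
  omega

theorem sample_chunks_spec : Claim_equal_sample_chunks := by
  intro chunks max_chunks _hdom hpre
  by_cases hemp : chunks = []
  · subst hemp
    simp only [Spec_sample_chunks, sample_chunks, sample_chunks_alt]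
    split_ifs with hif
    · rfl
    · simp [mergeSegs, PySem.List.slice, PySem.List.pyRange_one_eq_nil le_rfl,
        PySem.List.sorted, PySem.Set.ofList]
  · simp only [Spec_sample_chunks, sample_chunks, sample_chunks_alt]
    split_ifs with hif
    · rfl
    · push Not at hif
      simp only [PySem.Int.floordiv_eq_ediv_of_pos (b := 3) (by norm_num),
                 PySem.Int.floordiv_eq_ediv_of_pos (b := 2) (by norm_num)]
      set n : Int := (chunks.length : Int) with hn
      have hmn : max_chunks < n := hif.1
      set k : Int := (max_chunks + 2) / 3 with hk
      have hfes : 3 * -(-max_chunks / 3) / 3 = k := by omega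
      rw [hfes]
      set lo : Int := n / 2 - k / 2 with hlo
      have hhi : n / 2 + -(-k / 2) = n / 2 + (k + 1) / 2 := by omega
      rw [hhi]
      set hi : Int := n / 2 + (k + 1) / 2 with hhi2
      have hn1 : 1 ≤ n := by
        have := List.length_pos_iff.mpr hemp
        omega
      rcases hpre with h | h | hm1 | hneg
      · exact absurd h hemp
      · exact absurd h hif.2
      · -- usual case: 1 ≤ max_chunks < n
        have hk1 : 1 ≤ k := by omega
        have hkn : 3 * k - 1 ≤ n := by omega
        have hlo0 : 0 ≤ lo := by omega
        have hlohi : lo ≤ hi := by omega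
        have hhin : hi ≤ n := by omega
        have hlonk : lo ≤ n - k := by omega
        have hknk : k ≤ n - k := by omega
        have hbeg : PySem.List.slice (PySem.List.pyRange 0 n 1) none (some k) =
            PySem.List.pyRange 0 k 1 := by
          rw [PySem.List.slice_to _ (by omega)]
          have h := take_pyRange n k.toNat (by omega)
          rwa [Int.toNat_of_nonneg (by omega : (0:Int) ≤ k)] at h
        have hmid := slice_pyRange n lo hi hlo0 hlohi hhin
        have hend : PySem.List.slice (PySem.List.pyRange 0 n 1) (some (-k)) none =
            PySem.List.pyRange (n - k) n 1 := by
          rw [PySem.List.slice_some_none]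
          have hlen : (PySem.List.pyRange 0 n 1).length = n.toNat := by
            rw [PySem.List.length_pyRange_one]; omega
          have hkform : -k = -((k.toNat : Int)) := by omega
          rw [hlen, hkform, PySem.List.clampIdx_neg_natCast _ _ (by omega)]
          have h := drop_pyRange n (n.toNat - k.toNat) (by omega)
          rwa [(by omega : ((n.toNat - k.toNat : Nat) : Int) = n - k)] at h
        rw [hbeg, hmid, hend]
        simp only [mergeSegs]
        split_ifs with h1 h2 h2
        · -- all three intervals merge into [0, n)
          rw [sorted_set_eq _ (PySem.List.pyRange 0 n 1)
                (by intro x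
                    simp only [List.mem_append, PySem.List.mem_pyRange_one]
                    omega)
                (PySem.List.pairwise_lt_pyRange_one 0 n),
              map_get_pyRange chunks 0 n le_rfl (by omega) (by omega)]
          rw [(by omega : max (max k hi) n = n)]
          simp
        · -- beg and mid merge: [0, max k hi) and [n-k, n)
          rw [sorted_set_eq _ (PySem.List.pyRange 0 (max k hi) 1 ++ PySem.List.pyRange (n - k) n 1)
                (by intro x
                    simp only [List.mem_append, PySem.List.mem_pyRange_one]
                    omega)
                (pairwise_lt_pyRange_append _ _ _ _ (by intro x y _ hx _ _; omega)),
              List.map_append,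
              map_get_pyRange chunks 0 (max k hi) le_rfl (by omega) (by omega),
              map_get_pyRange chunks (n - k) n (by omega) (by omega) (by omega)]
          simp
        · -- mid and end merge: [0, k) and [lo, n)
          rw [sorted_set_eq _ (PySem.List.pyRange 0 k 1 ++ PySem.List.pyRange lo (max hi n) 1)
                (by intro x
                    simp only [List.mem_append, PySem.List.mem_pyRange_one]
                    omega)
                (pairwise_lt_pyRange_append _ _ _ _ (by intro x y _ hx hy _; omega)),
              List.map_append,
              map_get_pyRange chunks 0 k le_rfl (by omega) (by omega),
              map_get_pyRange chunks lo (max hi n) (by omega) (by omega) (by omega)]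
          simp
        · -- three disjoint intervals
          rw [sorted_set_eq _ (PySem.List.pyRange 0 k 1 ++
                (PySem.List.pyRange lo hi 1 ++ PySem.List.pyRange (n - k) n 1))
                (by intro x
                    simp only [List.mem_append, PySem.List.mem_pyRange_one]
                    omega)
                (by rw [List.pairwise_append]
                    refine ⟨PySem.List.pairwise_lt_pyRange_one 0 k,
                      pairwise_lt_pyRange_append _ _ _ _ (by intro x y _ _ _ _; omega), ?_⟩
                    intro x hx y hy
                    rw [PySem.List.mem_pyRange_one] at hx
                    rcases List.mem_append.mp hy with hy | hy <;>
                      rw [PySem.List.mem_pyRange_one] at hy <;> omega),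
              List.map_append, List.map_append,
              map_get_pyRange chunks 0 k le_rfl (by omega) (by omega),
              map_get_pyRange chunks lo hi (by omega) (by omega) (by omega),
              map_get_pyRange chunks (n - k) n (by omega) (by omega) (by omega)]
          simp
      · -- max_chunks ≤ -3·len(chunks): all six slices are empty and both sides return []
        have hkneg : k ≤ -n := by omega
        have hlon : n ≤ lo := by omega
        have hbeg : PySem.List.slice (PySem.List.pyRange 0 n 1) none (some k) = [] := by
          rw [(by omega : k = -(((-k).toNat : Nat) : Int)),
              PySem.List.slice_to_neg_natCast _ _ (by omega)]
          have h0 : (PySem.List.pyRange 0 n 1).length - (-k).toNat = 0 := by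
            rw [PySem.List.length_pyRange_one]; omega
          rw [h0, List.take_zero]
        have hmid : PySem.List.slice (PySem.List.pyRange 0 n 1) (some lo) (some hi) = [] :=
          slice_nil_of_start_ge _ lo hi (by rw [PySem.List.length_pyRange_one]; omega)
        have hend : PySem.List.slice (PySem.List.pyRange 0 n 1) (some (-k)) none = [] := by
          rw [PySem.List.slice_some_none,
              (by omega : -k = (((-k).toNat : Nat) : Int)), PySem.List.clampIdx_natCast]
          apply List.drop_eq_nil_of_le
          rw [PySem.List.length_pyRange_one]
          omega
        rw [hbeg, hmid, hend]
        have hB1 : PySem.List.slice chunks (some (0 : Int)) (some k) = [] := by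
          rw [PySem.List.slice_zero_start, (by omega : k = -(((-k).toNat : Nat) : Int)),
              PySem.List.slice_to_neg_natCast _ _ (by omega)]
          have h0 : chunks.length - (-k).toNat = 0 := by omega
          rw [h0, List.take_zero]
        have hB2 : PySem.List.slice chunks (some lo) (some hi) = [] :=
          slice_nil_of_start_ge chunks lo hi (by omega)
        have hB3 : PySem.List.slice chunks (some (n - k)) (some n) = [] :=
          slice_nil_of_start_ge chunks (n - k) n (by omega)
        simp only [mergeSegs]
        rw [if_neg (by omega : ¬ lo ≤ k), if_neg (by omega : ¬ n - k ≤ hi), hB1, hB2, hB3]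
        simp [PySem.List.sorted_eq_nil_iff]
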